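-- pv_equiv track=rewrite | github.com/youkangjin/programmers | 프로그래머스/unrated/181935. 홀짝에 따라 다른 값 반환하기/홀짝에 따라 다른 값 반환하기.py | solution
-- ===== SOURCE A (Python) =====
-- def solution(n):
--     sum=0
--     i=1
--     if n%2==1:
--         for i in range(i,n+1):
--             if i%2==1:
--                 sum=sum+i
--             i=i+1
--         return sum
--     else:
--         for i in range(i,n+1):
--             if i%2==0:
--                 sum=sum+(i*i)
--             i=i+1
--         return sum
-- ===== SOURCE B (Python) =====
-- def solution(n):
--     if n <= 0:
--         return 0
--     if n % 2 == 1: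
--         m = (n + 1) // 2
--         return m * m
--     m = n // 2
--     return 2 * m * (m + 1) * (2 * m + 1) // 3
-- ===== Notes on version B (the rewrite author's own statement) =====
-- stated objective: faster
-- what changed: Replaced the O(n) loop with closed-form arithmetic: the square of the count of odd terms for odd n, and the standard cubic formula for the sum of even squares for even n.
import Mathlib
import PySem

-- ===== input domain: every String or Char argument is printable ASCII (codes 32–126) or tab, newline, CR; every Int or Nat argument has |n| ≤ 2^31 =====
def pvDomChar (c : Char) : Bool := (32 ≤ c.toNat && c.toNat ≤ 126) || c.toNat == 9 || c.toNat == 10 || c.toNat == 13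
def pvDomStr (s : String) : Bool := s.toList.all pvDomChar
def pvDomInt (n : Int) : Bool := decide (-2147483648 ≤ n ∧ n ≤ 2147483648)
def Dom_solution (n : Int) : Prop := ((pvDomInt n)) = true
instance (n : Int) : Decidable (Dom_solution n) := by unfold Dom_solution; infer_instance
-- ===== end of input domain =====

-- B replaces A's loop with closed-form formulas for the two sums (objective: faster).

-- ===== PORT A =====
def solution (n : Int) : Int :=
  if PySem.Int.mod n 2 == 1 then
    (PySem.List.pyRange 1 (n + 1) 1).foldl
      (fun s i => if PySem.Int.mod i 2 == 1 then s + i else s) 0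
  else
    (PySem.List.pyRange 1 (n + 1) 1).foldl
      (fun s i => if PySem.Int.mod i 2 == 0 then s + i * i else s) 0

-- ===== PORT B =====
def solution_alt (n : Int) : Int :=
  if n ≤ 0 then 0
  else if PySem.Int.mod n 2 == 1 then
    let m := PySem.Int.floordiv (n + 1) 2
    m * m
  else
    let m := PySem.Int.floordiv n 2
    PySem.Int.floordiv (2 * m * (m + 1) * (2 * m + 1)) 3

-- ===== PRECONDITION & SPEC =====
def Spec_solution (n : Int) (out : Int) : Prop := out = solution_alt n
instance (n : Int) (out : Int) : Decidable (Spec_solution n out) := by unfold Spec_solution; infer_instance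

-- ===== CLAIM (what is proved, stated in full; the proofs are below) =====
def Claim_equal_solution : Prop := ∀ (n : Int), Dom_solution n → Spec_solution n (solution n)

-- ===== LEMMAS AND PROOFS =====

theorem oddFold_closed (m : Nat) :
    (PySem.List.pyRange 1 ((m : Int) + 1) 1).foldl
      (fun s i => if PySem.Int.mod i 2 == 1 then s + i else s) 0
    = (((m : Int) + 1) / 2) ^ 2 := by
  induction m with
  | zero => simp [PySem.List.pyRange_one_eq_nil]
  | succ k ih =>
      have e2 : ((k + 1 : Nat) : Int) = (k : Int) + 1 := by push_cast; ring
      rw [e2]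
      have h : PySem.List.pyRange 1 ((k : Int) + 1 + 1) 1
          = PySem.List.pyRange 1 ((k : Int) + 1) 1 ++ [(k : Int) + 1] := by
        have := PySem.List.pyRange_one_succ_right (a := 1) (b := (k : Int) + 1) (by omega)
        simpa using this
      rw [h, List.foldl_append, ih]
      simp only [List.foldl]
      by_cases hk : (k : Int) % 2 = 0
      · obtain ⟨a, ha⟩ : ∃ a : Int, (k : Int) = 2 * a := ⟨(k : Int) / 2, by omega⟩
        have hmod : PySem.Int.mod ((k : Int) + 1) 2 = 1 := by
          rw [PySem.Int.mod_eq_emod_of_pos (by omega)]; omega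
        have d1 : ((k : Int) + 1) / 2 = a := by omega
        have d2 : ((k : Int) + 1 + 1) / 2 = a + 1 := by omega
        rw [hmod]
        simp only [BEq.rfl, if_pos]
        rw [d1, d2, ha]
        ring
      · obtain ⟨a, ha⟩ : ∃ a : Int, (k : Int) = 2 * a + 1 := ⟨(k : Int) / 2, by omega⟩
        have hmod : PySem.Int.mod ((k : Int) + 1) 2 = 0 := by
          rw [PySem.Int.mod_eq_emod_of_pos (by omega)]; omega
        have d2 : ((k : Int) + 1 + 1) / 2 = ((k : Int) + 1) / 2 := by omega
        rw [hmod, d2]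
        norm_num

theorem evenFold_closed (m : Nat) :
    3 * (PySem.List.pyRange 1 ((m : Int) + 1) 1).foldl
      (fun s i => if PySem.Int.mod i 2 == 0 then s + i * i else s) 0
    = 2 * ((m : Int) / 2) * ((m : Int) / 2 + 1) * (2 * ((m : Int) / 2) + 1) := by
  induction m with
  | zero => simp [PySem.List.pyRange_one_eq_nil]
  | succ k ih =>
      have e2 : ((k + 1 : Nat) : Int) = (k : Int) + 1 := by push_cast; ring
      rw [e2]
      have h : PySem.List.pyRange 1 ((k : Int) + 1 + 1) 1
          = PySem.List.pyRange 1 ((k : Int) + 1) 1 ++ [(k : Int) + 1] := by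
        have := PySem.List.pyRange_one_succ_right (a := 1) (b := (k : Int) + 1) (by omega)
        simpa using this
      rw [h, List.foldl_append]
      simp only [List.foldl]
      by_cases hk : (k : Int) % 2 = 0
      · have hmod : PySem.Int.mod ((k : Int) + 1) 2 = 1 := by
          rw [PySem.Int.mod_eq_emod_of_pos (by omega)]; omega
        have d2 : ((k : Int) + 1) / 2 = (k : Int) / 2 := by omega
        rw [hmod, if_neg (by decide), d2]
        exact ih
      · obtain ⟨a, ha⟩ : ∃ a : Int, (k : Int) = 2 * a + 1 := ⟨(k : Int) / 2, by omega⟩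
        have hmod : PySem.Int.mod ((k : Int) + 1) 2 = 0 := by
          rw [PySem.Int.mod_eq_emod_of_pos (by omega)]; omega
        have d1 : ((k : Int)) / 2 = a := by omega
        have d2 : ((k : Int) + 1) / 2 = a + 1 := by omega
        rw [hmod, if_pos (by decide), mul_add, ih, d1, d2, ha]
        ring

-- ===== VERDICT (by name: the statement is the Claim_ definition above) =====
theorem solution_spec : Claim_equal_solution := by
  intro n _
  unfold Spec_solution solution solution_alt
  by_cases hn : n ≤ 0
  · have hnil : PySem.List.pyRange 1 (n + 1) 1 = [] :=
      PySem.List.pyRange_one_eq_nil (by omega)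
    rw [if_pos hn, hnil]
    split <;> simp
  · obtain ⟨m, hm⟩ : ∃ m : Nat, n = (m : Int) := ⟨n.toNat, by omega⟩
    subst hm
    rw [if_neg hn]
    by_cases hodd : PySem.Int.mod (m : Int) 2 == 1
    · rw [if_pos hodd, if_pos hodd, oddFold_closed m]
      rw [PySem.Int.floordiv_eq_ediv_of_pos (by omega)]
      ring
    · rw [if_neg hodd, if_neg hodd]
      have h3 := evenFold_closed m
      rw [PySem.Int.floordiv_eq_ediv_of_pos (by omega),
          PySem.Int.floordiv_eq_ediv_of_pos (by omega)]
      omega
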